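-- pv_equiv track=rewrite | github.com/Akire-Eam/Assembly-Masm32-Codes | MP.py | obter_posicoes_adjacentes
-- ===== SOURCE A (Python) =====
-- def cria_posicao(col, lin):
--     """
--     cria_posicao: str x str -> posicao
--     Esta funcao recebe duas cadeias de carateres correspondentes a
--     coluna e a linha de uma posicao e devolve a posicao correspondente.
--     """
--     col_para_num = {
--         'a': 1,
--         'b': 2,
--         'c': 3
--     }
--     if type(col) == type(lin) == str:
--         if col in col_para_num and lin in ('1','2','3'):
--             return [col_para_num[col] + 3*(int(lin)-1)]
--     raise ValueError('cria_posicao: argumentos invalidos')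
--
-- def obter_pos_c(pos):
--     """
--     obter_pos_c: posicao -> str
--     Esta funcao devolve a componente coluna da posicao.
--     """
--     if pos[0] in (1, 4, 7):
--         return 'a'
--     elif pos[0] in (2, 5, 8):
--         return 'b'
--     elif pos[0] in (3, 6, 9):
--         return 'c'
--
-- def obter_pos_l(pos):
--     """
--     obter_pos_l: posicao -> str
--     Esta funcao devolve a componente linha da posicao.
--     """
--     if pos[0] in (1, 2, 3):
--         return '1'
--     elif pos[0] in (4, 5, 6):
--         return '2'
--     elif pos[0] in (7, 8, 9):
--         return '3'
--
-- def posicao_para_str(pos):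
--     """
--     posicao_para_str: posicao -> str
--     Esta funcao devolve a cadeia de caracteres 'cl' que representa o
--     seu argumento, sendo os valores c e l as componentes coluna e linha
--     de pos.
--     """
--     return obter_pos_c(pos) + obter_pos_l(pos)
--
-- def obter_posicoes_adjacentes(pos):
--     """
--     obter_posicoes_adjacentes: posicao -> tuplo de posicoes
--     Esta funcao devolve um tuplo com as posicoes adjacantes a posicao
--     de acordo com a ordem de leitura do tabuleiro.
--     """
--     adj_aux = {
--         'a1': ('b1', 'a2', 'b2'),
--         'b1': ('a1', 'c1', 'b2'),
--         'c1': ('b1', 'b2', 'c2'),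
--         'a2': ('a1', 'b2', 'a3'),
--         'b2': ('a1', 'b1', 'c1', 'a2', 'c2', 'a3', 'b3', 'c3'),
--         'c2': ('c1', 'b2', 'c3'),
--         'a3': ('a2', 'b2', 'b3'),
--         'b3': ('b2', 'a3', 'c3'),
--         'c3': ('b2', 'c2', 'b3')
--     }
--     pos_adj = ()
--     for e in adj_aux[posicao_para_str(pos)]:
--         pos_adj += cria_posicao(e[0], e[1]),
--     return pos_adj
-- ===== SOURCE B (Python) =====
-- def obter_posicoes_adjacentes(pos):
--     """Geometric re-implementation: derive adjacency from row/column coordinates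
--     (orthogonal neighbours, plus diagonals only through the centre cell 5)
--     instead of a hard-coded dictionary."""
--     n = pos[0]
--     r, c = divmod(n - 1, 3)
--     res = ()
--     for m in range(1, 10):
--         rm, cm = divmod(m - 1, 3)
--         dr, dc = abs(rm - r), abs(cm - c)
--         if max(dr, dc) == 1 and (dr * dc == 0 or n == 5 or m == 5):
--             res += ([m],)
--     return res
-- ===== Notes on version B (the rewrite author's own statement) =====
-- stated objective: idiomatic
-- what changed: Replaces the hard-coded 9-entry adjacency dictionary (plus string round-tripping through cria_posicao/posicao_para_str) by deriving adjacency from grid geometry: compute row/column of the cell, scan cells 1..9 and keep those at Chebyshev distance 1 that are orthogonal neighbours or involve the centre cell.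
-- outside the precondition, e.g. on obter_posicoes_adjacentes([0]): A raises TypeError, B returns ([3],)
import Mathlib
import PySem

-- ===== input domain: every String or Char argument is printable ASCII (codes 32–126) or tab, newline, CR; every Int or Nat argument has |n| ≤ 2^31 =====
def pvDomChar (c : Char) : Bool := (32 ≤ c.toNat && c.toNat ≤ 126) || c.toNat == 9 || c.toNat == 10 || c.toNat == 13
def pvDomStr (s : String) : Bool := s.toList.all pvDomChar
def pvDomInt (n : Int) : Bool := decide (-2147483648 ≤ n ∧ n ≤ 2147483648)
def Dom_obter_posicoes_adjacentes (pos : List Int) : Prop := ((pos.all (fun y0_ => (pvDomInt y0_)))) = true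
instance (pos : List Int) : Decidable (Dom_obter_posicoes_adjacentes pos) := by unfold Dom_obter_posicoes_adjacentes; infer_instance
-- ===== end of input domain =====

-- B derives adjacency from grid geometry (row/col arithmetic over cells 1..9) instead of
-- A's hard-coded adjacency dictionary and string round-trips; objective: idiomatic.


-- ===== PORT A =====
-- cria_posicao at the character level (Python passes the 1-char strings e[0], e[1]);
-- none = ValueError
def pvCriaPosicao (col lin : Char) : Option (List Int) :=
  let col_para_num : PySem.Dict Char Int := PySem.Dict.ofList [('a', 1), ('b', 2), ('c', 3)]
  if (PySem.Dict.get? col_para_num col).isSome ∧ (lin = '1' ∨ lin = '2' ∨ lin = '3') then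
    some [(PySem.Dict.get? col_para_num col).getD 0 +
          3 * ((PySem.Int.ofChars? [lin]).getD 0 - 1)]
  else none

-- obter_pos_c; none = IndexError on pos[0] or Python's implicit None fall-through
def pvObterPosC (pos : List Int) : Option Char :=
  match PySem.List.pyGet? pos 0 with
  | none => none
  | some v =>
    if v = 1 ∨ v = 4 ∨ v = 7 then some 'a'
    else if v = 2 ∨ v = 5 ∨ v = 8 then some 'b'
    else if v = 3 ∨ v = 6 ∨ v = 9 then some 'c'
    else none

-- obter_pos_l
def pvObterPosL (pos : List Int) : Option Char :=
  match PySem.List.pyGet? pos 0 with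
  | none => none
  | some v =>
    if v = 1 ∨ v = 2 ∨ v = 3 then some '1'
    else if v = 4 ∨ v = 5 ∨ v = 6 then some '2'
    else if v = 7 ∨ v = 8 ∨ v = 9 then some '3'
    else none

-- posicao_para_str, as the two-character key; none = the TypeError of None + None
def pvPosicaoParaStr (pos : List Int) : Option (List Char) :=
  match pvObterPosC pos, pvObterPosL pos with
  | some c, some l => some [c, l]
  | _, _ => none

def pvAdjAux : PySem.Dict (List Char) (List (List Char)) :=
  PySem.Dict.ofList [(['a','1'], [['b','1'],['a','2'],['b','2']]),
   (['b','1'], [['a','1'],['c','1'],['b','2']]),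
   (['c','1'], [['b','1'],['b','2'],['c','2']]),
   (['a','2'], [['a','1'],['b','2'],['a','3']]),
   (['b','2'], [['a','1'],['b','1'],['c','1'],['a','2'],['c','2'],['a','3'],['b','3'],['c','3']]),
   (['c','2'], [['c','1'],['b','2'],['c','3']]),
   (['a','3'], [['a','2'],['b','2'],['b','3']]),
   (['b','3'], [['b','2'],['a','3'],['c','3']]),
   (['c','3'], [['b','2'],['c','2'],['b','3']])]

-- the []-returning arms replace Python exceptions (IndexError/TypeError/KeyError), all excluded by Pre_
def obter_posicoes_adjacentes (pos : List Int) : List (List Int) :=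
  match pvPosicaoParaStr pos with
  | none => []
  | some s =>
    match PySem.Dict.get? pvAdjAux s with
    | none => []
    | some adj =>
      adj.foldl (fun acc e =>
        acc ++ [(pvCriaPosicao (PySem.List.pyGetD e 0 ' ') (PySem.List.pyGetD e 1 ' ')).getD []]) []

-- ===== PORT B =====
def obter_posicoes_adjacentes_alt (pos : List Int) : List (List Int) :=
  let n := (PySem.List.pyGet? pos 0).getD 0  -- IndexError excluded by Pre_
  let r := PySem.Int.floordiv (n - 1) 3
  let c := PySem.Int.mod (n - 1) 3
  (PySem.List.pyRange 1 10 1).foldl (fun res m =>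
    let rm := PySem.Int.floordiv (m - 1) 3
    let cm := PySem.Int.mod (m - 1) 3
    let dr := |rm - r|
    let dc := |cm - c|
    if max dr dc = 1 ∧ (dr * dc = 0 ∨ n = 5 ∨ m = 5) then res ++ [[m]] else res) []

-- ===== PRECONDITION & SPEC =====
-- A raises (IndexError / TypeError on None / KeyError) unless pos is nonempty with pos[0] in 1..9
def Pre_obter_posicoes_adjacentes (pos : List Int) : Prop :=
  pos ≠ [] ∧ 1 ≤ pos.headI ∧ pos.headI ≤ 9
instance (pos : List Int) : Decidable (Pre_obter_posicoes_adjacentes pos) := by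
  unfold Pre_obter_posicoes_adjacentes; infer_instance
def pvWitness_obter_posicoes_adjacentes : List Int := [5]

def Spec_obter_posicoes_adjacentes (pos : List Int) (out : List (List Int)) : Prop := out = obter_posicoes_adjacentes_alt pos
instance (pos : List Int) (out : List (List Int)) : Decidable (Spec_obter_posicoes_adjacentes pos out) := by unfold Spec_obter_posicoes_adjacentes; infer_instance

-- ===== CLAIM (what is proved, stated in full; the proofs are below) =====
def Claim_equal_obter_posicoes_adjacentes : Prop := ∀ (pos : List Int), Dom_obter_posicoes_adjacentes pos → Pre_obter_posicoes_adjacentes pos → Spec_obter_posicoes_adjacentes pos (obter_posicoes_adjacentes pos)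

-- ===== LEMMAS AND PROOFS =====
-- both ports read only pos[0], so the tail can be dropped
theorem pvA_head_only (h : Int) (t : List Int) :
    obter_posicoes_adjacentes (h :: t) = obter_posicoes_adjacentes [h] := by
  simp [obter_posicoes_adjacentes, pvPosicaoParaStr, pvObterPosC, pvObterPosL]

theorem pvB_head_only (h : Int) (t : List Int) :
    obter_posicoes_adjacentes_alt (h :: t) = obter_posicoes_adjacentes_alt [h] := by
  simp [obter_posicoes_adjacentes_alt]

-- ===== VERDICT (by name: the statement is the Claim_ definition above) =====
theorem obter_posicoes_adjacentes_spec : Claim_equal_obter_posicoes_adjacentes := by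
  intro pos _ hpre
  unfold Spec_obter_posicoes_adjacentes
  obtain ⟨hne, h1, h9⟩ := hpre
  match pos with
  | [] => exact absurd rfl hne
  | h :: t =>
    simp only [List.headI] at h1 h9
    rw [pvA_head_only, pvB_head_only]
    interval_cases h <;> decide
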